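-- pv_equiv track=rewrite | github.com/anbarasanv/PythonWB | Maximum Sum of the Sub array non Contiguous.py | nonContSubSum
-- ===== SOURCE A (Python) =====
-- def nonContSubSum(arr):
--     l = len(arr)
--     s1 = arr[0]
--     s2 = 0
--     for i in range(1,l):
--         s3 = max(s1,s2)
--         s2 = s3
--         s1 = s2+arr[i]
--     return max(s1,s2)
-- ===== SOURCE B (Python) =====
-- def nonContSubSum(arr):
--     total = arr[0] if arr[0] > 0 else 0
--     for i in range(1, len(arr)):
--         if arr[i] > 0:
--             total += arr[i]
--     return total
-- ===== Notes on version B (the rewrite author's own statement) =====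
-- stated objective: simpler
-- what changed: Replaced the two-variable s1/s2/s3 DP recurrence with a single accumulator that adds each strictly positive element (the non-contiguous max sum is the sum of the positive elements, with an empty selection allowed); fewer operations per iteration.
import Mathlib
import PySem

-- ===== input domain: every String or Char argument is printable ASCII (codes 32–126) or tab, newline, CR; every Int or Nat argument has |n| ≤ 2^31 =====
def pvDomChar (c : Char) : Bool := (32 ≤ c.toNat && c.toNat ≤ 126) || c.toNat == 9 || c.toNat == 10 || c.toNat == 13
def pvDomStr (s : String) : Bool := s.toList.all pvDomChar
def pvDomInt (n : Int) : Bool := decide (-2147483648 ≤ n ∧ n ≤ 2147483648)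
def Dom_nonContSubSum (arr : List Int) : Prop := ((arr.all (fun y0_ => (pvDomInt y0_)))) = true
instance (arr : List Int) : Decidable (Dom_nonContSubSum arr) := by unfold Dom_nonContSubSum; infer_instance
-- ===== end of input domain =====

-- B replaces A's two-variable s1/s2/s3 DP with one accumulator summing the strictly positive elements (objective: simpler).
-- Both raise IndexError on the empty list (arr[0]); Pre_ excludes it.

-- ===== PORT A =====
-- A: s1 = arr[0]; s2 = 0; loop over the tail updating (s1, s2); return max(s1, s2).
def nonContSubSum (arr : List Int) : Int :=
  match arr with
  | [] => 0  -- Python raises IndexError at arr[0]; excluded by Pre_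
  | a :: t =>
    let st := t.foldl (fun (p : Int × Int) x =>
      let s3 := max p.1 p.2
      (s3 + x, s3)) (a, 0)
    max st.1 st.2

-- ===== PORT B =====
def nonContSubSum_alt (arr : List Int) : Int :=
  match arr with
  | [] => 0  -- Python raises IndexError at arr[0]; excluded by Pre_
  | a :: t =>
    t.foldl (fun tot x => if x > 0 then tot + x else tot) (if a > 0 then a else 0)

-- ===== PRECONDITION & SPEC =====
-- A evaluates arr[0] unconditionally, so it raises IndexError on the empty list; Pre_ excludes exactly that.
def Pre_nonContSubSum (arr : List Int) : Prop := arr ≠ []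
instance (arr : List Int) : Decidable (Pre_nonContSubSum arr) := by unfold Pre_nonContSubSum; infer_instance
def pvWitness_nonContSubSum : List Int := ([3, -2, 4])
def Spec_nonContSubSum (arr : List Int) (out : Int) : Prop := out = nonContSubSum_alt arr
instance (arr : List Int) (out : Int) : Decidable (Spec_nonContSubSum arr out) := by unfold Spec_nonContSubSum; infer_instance

-- ===== CLAIM (what is proved, stated in full; the proofs are below) =====
def Claim_equal_nonContSubSum : Prop := ∀ (arr : List Int), Dom_nonContSubSum arr → Pre_nonContSubSum arr → Spec_nonContSubSum arr (nonContSubSum arr)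

-- ===== LEMMAS AND PROOFS =====

-- B's accumulator shifts by its initial value.
theorem altFold_shift (t : List Int) (c : Int) :
    t.foldl (fun tot x => if x > 0 then tot + x else tot) c
      = c + t.foldl (fun tot x => if x > 0 then tot + x else tot) 0 := by
  induction t generalizing c with
  | nil => simp
  | cons x t ih =>
    simp only [List.foldl_cons]
    rw [ih (if x > 0 then c + x else c), ih (if x > 0 then (0:Int) + x else 0)]
    split_ifs <;> ring

-- A's fold invariant: the final max equals max of the initial pair plus the positive-sum of the tail.
theorem A_fold_eq (t : List Int) (s1 s2 : Int) :
    (let st := t.foldl (fun (p : Int × Int) x =>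
        let s3 := max p.1 p.2
        (s3 + x, s3)) (s1, s2)
     max st.1 st.2)
      = max s1 s2 + t.foldl (fun tot x => if x > 0 then tot + x else tot) 0 := by
  induction t generalizing s1 s2 with
  | nil => simp
  | cons x t ih =>
    simp only [List.foldl_cons]
    rw [ih (max s1 s2 + x) (max s1 s2)]
    conv_rhs => rw [altFold_shift]
    generalize t.foldl (fun tot x => if x > 0 then tot + x else tot) 0 = F
    split_ifs with h <;> omega

-- ===== VERDICT (by name: the statement is the Claim_ definition above) =====
theorem nonContSubSum_spec : Claim_equal_nonContSubSum := by
  intro arr _ hpre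
  unfold Spec_nonContSubSum
  match arr with
  | [] => exact absurd rfl hpre
  | a :: t =>
    show (let st := t.foldl _ (a, 0); max st.1 st.2) = _
    rw [A_fold_eq]
    show _ = t.foldl (fun tot x => if x > 0 then tot + x else tot) (if a > 0 then a else 0)
    rw [altFold_shift t (if a > 0 then a else 0)]
    generalize t.foldl (fun tot x => if x > 0 then tot + x else tot) 0 = F
    split_ifs with h <;> omega
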